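-- pv_equiv track=rewrite | github.com/mehCake/luraph-deobfuscator-py | src/review_ui.py | _canonicalize_vote_name
-- ===== SOURCE A (Python) =====
-- from typing import Any, Dict, Iterable, List, Mapping, MutableMapping, Optional
--
-- def _canonicalize_vote_name(raw: Optional[str]) -> Optional[str]:
--     if raw is None:
--         return None
--     candidate = raw.strip()
--     if not candidate:
--         return None
--     canonical: List[str] = []
--     last_was_underscore = False
--     for char in candidate:
--         if char.isalnum():
--             canonical.append(char.upper())
--             last_was_underscore = False
--         else:
--             if not last_was_underscore:
--                 canonical.append("_")
--             last_was_underscore = True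
--     cleaned = "".join(canonical).strip("_")
--     if not cleaned:
--         return None
--     if cleaned[0].isdigit():
--         cleaned = f"OP_{cleaned}"
--     return cleaned
-- ===== SOURCE B (Python) =====
-- def _canonicalize_vote_name(raw):
--     if raw is None:
--         return None
--     candidate = raw.strip()
--     if not candidate:
--         return None
--     tokens = []
--     i, n = 0, len(candidate)
--     while i < n:
--         if candidate[i].isalnum():
--             j = i
--             while j < n and candidate[j].isalnum():
--                 j += 1
--             tokens.append(candidate[i:j].upper())
--             i = j
--         else:
--             i += 1
--     if not tokens:
--         return None
--     cleaned = "_".join(tokens)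
--     if cleaned[0].isdigit():
--         cleaned = f"OP_{cleaned}"
--     return cleaned
-- ===== Notes on version B (the rewrite author's own statement) =====
-- stated objective: idiomatic
-- what changed: B splits the stripped string into maximal alnum runs (inner scan per run, slicewise upper() per run) and joins the uppercased runs with a single underscore separator, instead of A's per-character flag machine that builds a char list and then strips leading/trailing underscores.
import Mathlib
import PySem

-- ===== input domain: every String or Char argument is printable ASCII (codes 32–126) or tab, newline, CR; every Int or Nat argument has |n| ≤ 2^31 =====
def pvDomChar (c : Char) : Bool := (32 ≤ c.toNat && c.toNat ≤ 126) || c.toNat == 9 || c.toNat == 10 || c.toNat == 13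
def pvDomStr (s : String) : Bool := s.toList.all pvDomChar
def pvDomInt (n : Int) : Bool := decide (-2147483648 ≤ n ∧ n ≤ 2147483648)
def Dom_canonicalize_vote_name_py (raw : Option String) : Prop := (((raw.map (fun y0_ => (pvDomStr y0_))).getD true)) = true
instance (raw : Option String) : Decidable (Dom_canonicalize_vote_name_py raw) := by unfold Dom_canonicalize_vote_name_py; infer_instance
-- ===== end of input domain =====

-- B replaces A's per-character flag machine plus final strip of underscores by splitting
-- into maximal alnum runs and joining the uppercased runs with a single underscore
-- separator (idiomatic decomposition).

-- ===== PORT A =====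
def canonicalize_vote_name_py (raw : Option String) : Option String :=
  match raw with
  | none => none
  | some s =>
    let candidate := PySem.Chars.strip s.toList
    if candidate = [] then none
    else
      let st := candidate.foldl (fun (st : List Char × Bool) ch =>
        if PySem.Chars.isalnum ch then (st.1 ++ [PySem.Chars.upperChar ch], false)
        else if st.2 = false then (st.1 ++ ['_'], true) else (st.1, true)) ([], false)
      let cleaned := PySem.Chars.stripChars st.1 ['_']
      if cleaned = [] then none
      else if PySem.Chars.isdigit cleaned.headI then
        some (String.ofList ('O' :: 'P' :: '_' :: cleaned))
      else some (String.ofList cleaned)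

-- ===== PORT B =====
-- maximal-alnum-run splitter (the two-level index scan of Source B)
def pvRunsB : List Char → List (List Char)
  | [] => []
  | c :: cs =>
    if PySem.Chars.isalnum c then
      ((c :: cs).takeWhile PySem.Chars.isalnum).map PySem.Chars.upperChar
        :: pvRunsB ((c :: cs).dropWhile PySem.Chars.isalnum)
    else pvRunsB cs
termination_by l => l.length
decreasing_by
  · simp_all [List.dropWhile]
    exact List.length_dropWhile_le _ _
  · simp

def canonicalize_vote_name_py_alt (raw : Option String) : Option String :=
  match raw with
  | none => none
  | some s =>
    let candidate := PySem.Chars.strip s.toList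
    if candidate = [] then none
    else
      let tokens := pvRunsB candidate
      if tokens = [] then none
      else
        let cleaned := PySem.Chars.join ['_'] tokens
        if PySem.Chars.isdigit cleaned.headI then
          some (String.ofList ('O' :: 'P' :: '_' :: cleaned))
        else some (String.ofList cleaned)

-- ===== PRECONDITION & SPEC =====
def Spec_canonicalize_vote_name_py (raw : Option String) (out : Option String) : Prop := out = canonicalize_vote_name_py_alt raw
instance (raw : Option String) (out : Option String) : Decidable (Spec_canonicalize_vote_name_py raw out) := by unfold Spec_canonicalize_vote_name_py; infer_instance

-- ===== CLAIM (what is proved, stated in full; the proofs are below) =====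
def Claim_equal_canonicalize_vote_name_py : Prop := ∀ (raw : Option String), Dom_canonicalize_vote_name_py raw → Spec_canonicalize_vote_name_py raw (canonicalize_vote_name_py raw)

-- ===== LEMMAS AND PROOFS =====

-- '_' membership test used by strip('_'); non-alnum test used by the run splitter
def pvU (c : Char) : Bool := c == '_'
def pvN (c : Char) : Bool := !PySem.Chars.isalnum c
-- left / right strips of strip('_')
def pvL (s : List Char) : List Char := s.dropWhile pvU
def pvR (s : List Char) : List Char := (s.reverse.dropWhile pvU).reverse

lemma pvStripChars_eq (s : List Char) :
    PySem.Chars.stripChars s ['_'] = pvR (pvL s) := by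
  have hp : pvU = (fun c => decide (c = '_')) := by
    funext c
    rcases Decidable.eq_or_ne c '_' with h | h <;> simp [pvU, h]
  simp [PySem.Chars.stripChars, pvR, pvL, hp]

-- recursive form of A's flag machine
def pvCollapse : Bool → List Char → List Char
  | _, [] => []
  | b, c :: cs =>
    if PySem.Chars.isalnum c then PySem.Chars.upperChar c :: pvCollapse false cs
    else if b = false then '_' :: pvCollapse true cs else pvCollapse true cs

lemma pvCharLe (a b : Char) : (a ≤ b) ↔ (a.toNat ≤ b.toNat) := by
  rw [Char.le_def]; exact UInt32.le_iff_toNat_le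

lemma pvUpper_alnum (c : Char) :
    PySem.Chars.isalnum (PySem.Chars.upperChar c) = PySem.Chars.isalnum c := by
  unfold PySem.Chars.upperChar PySem.Chars.isalnum PySem.Chars.isalpha
    PySem.Chars.isupper PySem.Chars.islower PySem.Chars.isdigit
  by_cases h : (decide ('a' ≤ c) && decide (c ≤ 'z')) = true
  · simp only [h, if_true]
    have h1 : 97 ≤ c.toNat := by
      have := (pvCharLe 'a' c).mp (of_decide_eq_true ((Bool.and_eq_true ..).mp h |>.1))
      simpa using this
    have h2 : c.toNat ≤ 122 := by
      have := (pvCharLe c 'z').mp (of_decide_eq_true ((Bool.and_eq_true ..).mp h |>.2))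
      simpa using this
    have ht : (Char.ofNat (c.toNat - 32)).toNat = c.toNat - 32 := by
      unfold Char.ofNat; split
      · rfl
      · omega
    simp only [pvCharLe, ht]
    simp only [show ('A').toNat = 65 from rfl, show ('Z').toNat = 90 from rfl,
      show ('a').toNat = 97 from rfl, show ('z').toNat = 122 from rfl,
      show ('0').toNat = 48 from rfl, show ('9').toNat = 57 from rfl]
    rw [Bool.eq_iff_iff]
    simp only [Bool.or_eq_true, Bool.and_eq_true, decide_eq_true_eq]
    simp only [or_true, true_or, iff_true]
    omega
  · have hb : (decide ('a' ≤ c) && decide (c ≤ 'z')) = false := by simpa using h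
    simp [hb]

lemma pvUpper_ne_underscore (c : Char) (h : PySem.Chars.isalnum c = true) :
    pvU (PySem.Chars.upperChar c) = false := by
  have h2 := pvUpper_alnum c
  rw [h] at h2
  simp only [pvU, beq_eq_false_iff_ne, ne_eq]
  intro he
  rw [he] at h2
  exact absurd h2 (by decide)

lemma pvFold_eq (cs : List Char) : ∀ (acc : List Char) (b : Bool),
    (cs.foldl (fun (st : List Char × Bool) ch =>
        if PySem.Chars.isalnum ch then (st.1 ++ [PySem.Chars.upperChar ch], false)
        else if st.2 = false then (st.1 ++ ['_'], true) else (st.1, true)) (acc, b)).1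
      = acc ++ pvCollapse b cs := by
  intro acc b
  induction cs generalizing acc b with
  | nil => simp [pvCollapse]
  | cons c cs ih =>
    simp only [List.foldl_cons]
    by_cases h : PySem.Chars.isalnum c
    · simp [h, ih, pvCollapse]
    · cases b <;> simp [h, ih, pvCollapse]

lemma pvCollapse_true (cs : List Char) :
    pvCollapse true cs = pvCollapse false (cs.dropWhile pvN) := by
  induction cs with
  | nil => simp [pvCollapse]
  | cons c cs ih =>
    by_cases h : PySem.Chars.isalnum c
    · simp [pvCollapse, h, pvN]
    · simp [pvCollapse, h, pvN, ih]

lemma pvCollapse_run (run rest : List Char) (h : ∀ c ∈ run, PySem.Chars.isalnum c = true) :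
    pvCollapse false (run ++ rest) = run.map PySem.Chars.upperChar ++ pvCollapse false rest := by
  induction run with
  | nil => simp
  | cons a run ih =>
    have ha := h a (by simp)
    simp [pvCollapse, ha, ih (fun c hc => h c (by simp [hc]))]

lemma pvRunsB_dropN (cs : List Char) : pvRunsB (cs.dropWhile pvN) = pvRunsB cs := by
  induction cs with
  | nil => simp
  | cons c cs ih =>
    by_cases h : PySem.Chars.isalnum c
    · simp [pvN, h]
    · rw [List.dropWhile_cons]
      simp only [pvN, h, Bool.not_false, if_true]
      rw [ih]
      conv_rhs => rw [pvRunsB]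
      simp [h]

lemma pvRunsB_ne_nil (cs : List Char) (r : List Char) (rs : List (List Char))
    (h : pvRunsB cs = r :: rs) : r ≠ [] := by
  induction cs generalizing r rs with
  | nil => simp [pvRunsB] at h
  | cons c cs ih =>
    by_cases hc : PySem.Chars.isalnum c
    · rw [pvRunsB] at h
      simp only [hc, if_true] at h
      have hr := (List.cons.injEq ..).mp h |>.1
      rw [List.takeWhile_cons_of_pos hc] at hr
      simp [← hr]
    · rw [pvRunsB] at h
      simp only [hc] at h
      rw [if_neg (by simp)] at h
      exact ih _ _ h

lemma pvDropWhile_head (p : Char → Bool) (cs : List Char) :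
    cs.dropWhile p = [] ∨ p ((cs.dropWhile p).headI) = false := by
  induction cs with
  | nil => exact Or.inl rfl
  | cons c cs ih =>
    by_cases h : p c
    · simpa [List.dropWhile_cons, h] using ih
    · right
      simp [h]

lemma pvR_append (pre X : List Char) :
    pvR (pre ++ X) = if pvR X = [] then pvR pre else pre ++ pvR X := by
  unfold pvR
  rw [List.reverse_append, List.dropWhile_append]
  by_cases h : X.reverse.dropWhile pvU = []
  · simp [h]
  · have h2 : (X.reverse.dropWhile pvU).reverse ≠ [] := by simpa using h
    simp [h, h2, List.isEmpty_iff]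

lemma pvDropWhile_all (Y : List Char) (h : ∀ a ∈ Y, pvU a = false) : Y.dropWhile pvU = Y := by
  cases Y with
  | nil => rfl
  | cons a Y => simp [h a (by simp)]

lemma pvR_all (pre : List Char) (h : ∀ a ∈ pre, pvU a = false) : pvR pre = pre := by
  unfold pvR
  rw [pvDropWhile_all _ (fun a ha => h a (by simpa using ha)), List.reverse_reverse]

lemma pvJoin_cons (r : List Char) (rs : List (List Char)) :
    PySem.Chars.join ['_'] (r :: rs) =
      r ++ (if rs = [] then [] else '_' :: PySem.Chars.join ['_'] rs) := by
  cases rs with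
  | nil => simp [PySem.Chars.join, List.intercalate]
  | cons y ys => simp [PySem.Chars.join, List.intercalate, List.intersperse]

lemma pvJoin_eq_nil_iff (cs : List Char) :
    PySem.Chars.join ['_'] (pvRunsB cs) = [] ↔ pvRunsB cs = [] := by
  constructor
  · intro h
    cases hr : pvRunsB cs with
    | nil => rfl
    | cons r rs =>
      rw [hr, pvJoin_cons] at h
      rcases List.append_eq_nil_iff.mp h with ⟨hr0, -⟩
      exact absurd hr0 (pvRunsB_ne_nil cs r rs hr)
  · intro h
    simp [h, PySem.Chars.join, List.intercalate]

lemma pvMain : ∀ (n : Nat) (cs : List Char), cs.length ≤ n →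
    (pvR (pvL (pvCollapse false cs)) = PySem.Chars.join ['_'] (pvRunsB cs)) ∧
    ((cs = [] ∨ PySem.Chars.isalnum cs.headI = false) →
      pvR (pvCollapse false cs) =
        if pvRunsB cs = [] then [] else '_' :: PySem.Chars.join ['_'] (pvRunsB cs)) := by
  intro n
  induction n with
  | zero =>
    intro cs h
    have hcs : cs = [] := List.eq_nil_of_length_eq_zero (Nat.le_zero.mp h)
    subst hcs
    refine ⟨by simp [pvCollapse, pvL, pvR, pvRunsB, PySem.Chars.join, List.intercalate], ?_⟩
    intro _
    simp [pvCollapse, pvR, pvRunsB]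
  | succ n ih =>
    intro cs hlen
    cases cs with
    | nil =>
      refine ⟨by simp [pvCollapse, pvL, pvR, pvRunsB, PySem.Chars.join, List.intercalate], ?_⟩
      intro _
      simp [pvCollapse, pvR, pvRunsB]
    | cons c cs' =>
      by_cases hal : PySem.Chars.isalnum c = true
      · -- head is alnum: a maximal run is peeled off
        have hsplit : (c :: cs').takeWhile PySem.Chars.isalnum ++ (c :: cs').dropWhile PySem.Chars.isalnum = c :: cs' :=
          List.takeWhile_append_dropWhile
        have hrunal : ∀ a ∈ (c :: cs').takeWhile PySem.Chars.isalnum, PySem.Chars.isalnum a = true :=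
          fun a ha => List.mem_takeWhile_imp ha
        have hcol : pvCollapse false (c :: cs') =
            ((c :: cs').takeWhile PySem.Chars.isalnum).map PySem.Chars.upperChar ++
              pvCollapse false ((c :: cs').dropWhile PySem.Chars.isalnum) := by
          conv_lhs => rw [← hsplit]
          exact pvCollapse_run _ _ hrunal
        have hrest_len : ((c :: cs').dropWhile PySem.Chars.isalnum).length ≤ n := by
          rw [List.dropWhile_cons_of_pos hal]
          have := List.length_dropWhile_le PySem.Chars.isalnum cs'
          simp at hlen
          omega
        have hrest_head := pvDropWhile_head PySem.Chars.isalnum (c :: cs')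
        have ihr := (ih _ hrest_len).2 (by
          rcases hrest_head with h | h
          · exact Or.inl h
          · exact Or.inr h)
        have hrun : (c :: cs').takeWhile PySem.Chars.isalnum = c :: cs'.takeWhile PySem.Chars.isalnum :=
          List.takeWhile_cons_of_pos hal
        have hpre_all : ∀ a ∈ ((c :: cs').takeWhile PySem.Chars.isalnum).map PySem.Chars.upperChar, pvU a = false := by
          intro a ha
          obtain ⟨b, hb, rfl⟩ := List.mem_map.mp ha
          exact pvUpper_ne_underscore b (hrunal b hb)
        have hpreR := pvR_all _ hpre_all
        have hLpre : pvL (((c :: cs').takeWhile PySem.Chars.isalnum).map PySem.Chars.upperChar ++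
            pvCollapse false ((c :: cs').dropWhile PySem.Chars.isalnum)) =
            ((c :: cs').takeWhile PySem.Chars.isalnum).map PySem.Chars.upperChar ++
              pvCollapse false ((c :: cs').dropWhile PySem.Chars.isalnum) := by
          rw [hrun]
          simp [pvL, pvUpper_ne_underscore c hal]
        have hrunsB : pvRunsB (c :: cs') =
            ((c :: cs').takeWhile PySem.Chars.isalnum).map PySem.Chars.upperChar ::
              pvRunsB ((c :: cs').dropWhile PySem.Chars.isalnum) := by
          rw [pvRunsB]
          simp [hal]
        constructor
        · rw [hcol, hLpre, pvR_append, ihr, hrunsB, pvJoin_cons]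
          by_cases hre : pvRunsB ((c :: cs').dropWhile PySem.Chars.isalnum) = []
          · simp [hre, hpreR]
          · simp [hre]
        · intro hcontra
          rcases hcontra with h | h
          · exact absurd h (by simp)
          · rw [List.headI] at h
            rw [hal] at h
            exact absurd h (by simp)
      · -- head is not alnum
        have hcol : pvCollapse false (c :: cs') = '_' :: pvCollapse false (cs'.dropWhile pvN) := by
          simp [pvCollapse, hal, pvCollapse_true]
        have hlen2 : (cs'.dropWhile pvN).length ≤ n := by
          have := List.length_dropWhile_le pvN cs'
          simp at hlen
          omega
        have hruns : pvRunsB (c :: cs') = pvRunsB (cs'.dropWhile pvN) := by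
          rw [pvRunsB, pvRunsB_dropN]
          simp [hal]
        have ihm := (ih _ hlen2).1
        constructor
        · rw [hcol]
          have hLu : pvL ('_' :: pvCollapse false (cs'.dropWhile pvN)) =
              pvL (pvCollapse false (cs'.dropWhile pvN)) := by
            simp [pvL, pvU]
          rw [hLu, ihm, hruns]
        · intro _
          rw [hcol, hruns]
          cases hh : cs'.dropWhile pvN with
          | nil =>
            rw [show pvRunsB ([] : List Char) = [] from by rw [pvRunsB]]
            simp [pvCollapse, pvR, List.dropWhile, pvU]
          | cons e es =>
            have healn : PySem.Chars.isalnum e = true := by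
              rcases pvDropWhile_head pvN cs' with h | h
              · rw [hh] at h; exact absurd h (by simp)
              · rw [hh] at h
                simpa [pvN] using h
            -- the collapsed tail starts with an alnum character
            have hcol2 : pvCollapse false (e :: es) =
                PySem.Chars.upperChar e :: pvCollapse false es := by
              simp [pvCollapse, healn]
            have hLX : pvL (pvCollapse false (e :: es)) = pvCollapse false (e :: es) := by
              rw [hcol2]
              simp [pvL, pvUpper_ne_underscore e healn]
            have hRX : pvR (pvCollapse false (e :: es)) =
                PySem.Chars.join ['_'] (pvRunsB (e :: es)) := by
              have := ihm
              rw [hh] at this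
              rw [← hLX]
              exact this
            have hrne : pvRunsB (e :: es) ≠ [] := by
              rw [pvRunsB]
              simp [healn]
            have hjne : PySem.Chars.join ['_'] (pvRunsB (e :: es)) ≠ [] :=
              fun hj => hrne ((pvJoin_eq_nil_iff _).mp hj)
            rw [show ('_' :: pvCollapse false (e :: es)) = ['_'] ++ pvCollapse false (e :: es) from rfl]
            rw [pvR_append, hRX]
            simp [hjne, hrne]

lemma pvCleaned_eq (cs : List Char) :
    PySem.Chars.stripChars (pvCollapse false cs) ['_'] = PySem.Chars.join ['_'] (pvRunsB cs) := by
  rw [pvStripChars_eq]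
  exact (pvMain cs.length cs le_rfl).1

-- ===== VERDICT (by name: the statement is the Claim_ definition above) =====
theorem canonicalize_vote_name_py_spec : Claim_equal_canonicalize_vote_name_py := by
  intro raw _
  unfold Spec_canonicalize_vote_name_py canonicalize_vote_name_py canonicalize_vote_name_py_alt
  cases raw with
  | none => rfl
  | some s =>
    simp only
    set cand := PySem.Chars.strip s.toList with hcand
    by_cases hc : cand = []
    · simp [hc]
    · simp only [hc, if_false]
      rw [pvFold_eq]
      simp only [List.nil_append]
      rw [pvCleaned_eq]
      by_cases ht : pvRunsB cand = []
      · simp [ht, PySem.Chars.join, List.intercalate]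
      · simp [ht, (pvJoin_eq_nil_iff cand).not.mpr ht]
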